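-- pv_equiv track=rewrite | github.com/Kotfix90/Word_automation | code/auto_proc.py | get_stacks_serial_numb
-- ===== SOURCE A (Python) =====
-- def get_stacks_serial_numb(serial_numbs):
--
--     # Делаем словарь для для стэков
--     stack_dict = {}
--
--     start_idx = 0
--     for idx, sn in enumerate(serial_numbs, start=0):
--         try:
--             right_part = sn.split('-')[-1]
--             next_right_part = serial_numbs[idx+1].split('-')[-1]
--             if right_part[:2] == next_right_part[:2]:
--                 continue
--             else:
--                 # ключ номер позиции значение список номеров по срезу
--                 stack_dict[right_part[:2]] = serial_numbs[start_idx:idx+1]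
--                 start_idx = idx+1
--         except IndexError:
--             # ключ номер позиции значение список номеров по срезу
--             stack_dict[right_part[:2]] = serial_numbs[start_idx:idx+1]
--             break
--
--     return stack_dict
-- ===== SOURCE B (Python) =====
-- def get_stacks_serial_numb(serial_numbs):
--     key = lambda sn: sn.split('-')[-1][:2]
--     # split the list into maximal consecutive runs of equal key, then build the dict
--     runs = []
--     rest = serial_numbs
--     while rest:
--         k = key(rest[0])
--         i = 1
--         while i < len(rest) and key(rest[i]) == k:
--             i += 1
--         runs.append((k, rest[:i]))
--         rest = rest[i:]
--     return {k: grp for k, grp in runs}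
-- ===== Notes on version B (the rewrite author's own statement) =====
-- stated objective: simpler
-- what changed: B splits the list into maximal consecutive runs of equal key (head + run-scan two-pointer) and then builds the dict from the runs, dropping A's enumerate/start_idx bookkeeping, the [idx+1] lookahead and the try/except IndexError control flow.
import Mathlib
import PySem

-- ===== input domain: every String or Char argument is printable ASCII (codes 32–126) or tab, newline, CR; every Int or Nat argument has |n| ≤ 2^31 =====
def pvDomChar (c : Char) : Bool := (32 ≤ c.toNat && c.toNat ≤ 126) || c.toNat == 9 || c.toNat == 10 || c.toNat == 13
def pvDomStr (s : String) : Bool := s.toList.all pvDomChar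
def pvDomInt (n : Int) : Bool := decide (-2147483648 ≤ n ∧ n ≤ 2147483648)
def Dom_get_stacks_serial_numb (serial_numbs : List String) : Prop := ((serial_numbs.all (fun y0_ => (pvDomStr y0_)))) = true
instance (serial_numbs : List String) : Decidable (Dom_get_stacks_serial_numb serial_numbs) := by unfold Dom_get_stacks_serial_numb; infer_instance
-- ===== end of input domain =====

-- B groups the list into maximal consecutive runs of equal key and then builds the dict
-- from the runs, replacing A's enumerate/start_idx/lookahead/try-except bookkeeping (objective: simpler).

-- shared subexpression of both Pythons: sn.split('-')[-1][:2]  (split('-') never raises: sep ≠ "")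
def snKey (sn : String) : String :=
  PySem.Str.slice (PySem.List.pyGetD ((PySem.Str.split? sn "-").getD []) (-1) "") none (some 2)

-- ===== PORT A =====
-- A's loop: enumerate with start_idx; the argument `rest` is `serial_numbs.drop idx`; the
-- `rest' = []` case is exactly where `serial_numbs[idx+1]` raises IndexError (caught: assign, break).
def gssnLoopA (orig : List String) (d : PySem.Dict String (List String))
    (start_idx idx : Nat) : List String → PySem.Dict String (List String)
  | [] => d
  | sn :: rest' =>
    let right_part := PySem.List.pyGetD ((PySem.Str.split? sn "-").getD []) (-1) ""
    match rest' with
    | [] =>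
      -- except IndexError: stack_dict[right_part[:2]] = serial_numbs[start_idx:idx+1]; break
      d.insert (PySem.Str.slice right_part none (some 2))
        (PySem.List.slice orig (some (start_idx : Int)) (some ((idx : Int) + 1)))
    | sn2 :: _ =>
      let next_right_part := PySem.List.pyGetD ((PySem.Str.split? sn2 "-").getD []) (-1) ""
      if PySem.Str.slice right_part none (some 2) = PySem.Str.slice next_right_part none (some 2) then
        gssnLoopA orig d start_idx (idx + 1) rest'
      else
        gssnLoopA orig
          (d.insert (PySem.Str.slice right_part none (some 2))
            (PySem.List.slice orig (some (start_idx : Int)) (some ((idx : Int) + 1))))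
          (idx + 1) (idx + 1) rest'

def get_stacks_serial_numb (serial_numbs : List String) : List (String × List String) :=
  (gssnLoopA serial_numbs PySem.Dict.empty 0 0 serial_numbs).items

-- ===== PORT B =====
-- Source B's outer while: peel one maximal run (head + takeWhile of equal keys) per step
def gssnRuns : List String → List (String × List String)
  | [] => []
  | x :: rest =>
    let k := snKey x
    (k, x :: rest.takeWhile (fun y => snKey y == k)) ::
      gssnRuns (rest.dropWhile (fun y => snKey y == k))
termination_by xs => xs.length
decreasing_by
  simp only [List.length_cons]
  exact Nat.lt_succ_of_le (List.length_dropWhile_le _ _)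

def get_stacks_serial_numb_alt (serial_numbs : List String) : List (String × List String) :=
  ((gssnRuns serial_numbs).foldl (fun d kg => d.insert kg.1 kg.2) PySem.Dict.empty).items

-- ===== PRECONDITION & SPEC =====
def Spec_get_stacks_serial_numb (serial_numbs : List String) (out : List (String × List String)) : Prop := out = get_stacks_serial_numb_alt serial_numbs
instance (serial_numbs : List String) (out : List (String × List String)) : Decidable (Spec_get_stacks_serial_numb serial_numbs out) := by unfold Spec_get_stacks_serial_numb; infer_instance

-- ===== CLAIM (what is proved, stated in full; the proofs are below) =====
def Claim_equal_get_stacks_serial_numb : Prop := ∀ (serial_numbs : List String), Dom_get_stacks_serial_numb serial_numbs → Spec_get_stacks_serial_numb serial_numbs (get_stacks_serial_numb serial_numbs)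

-- ===== LEMMAS AND PROOFS =====

-- fold the literal key expression of port A back to snKey
lemma snKey_def (sn : String) :
    PySem.Str.slice (PySem.List.pyGetD ((PySem.Str.split? sn "-").getD []) (-1) "") none (some 2)
      = snKey sn := rfl

lemma takeWhile_all_append (k : String) (ps zs : List String)
    (h : ∀ y ∈ ps, snKey y = k) :
    (ps ++ zs).takeWhile (fun y => snKey y == k) = ps ++ zs.takeWhile (fun y => snKey y == k) := by
  induction ps with
  | nil => rfl
  | cons q qs ih =>
    have hq : snKey q = k := h q (by simp)
    simp only [List.cons_append, List.takeWhile_cons, hq, beq_self_eq_true]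
    exact congrArg (q :: ·) (ih (fun y hy => h y (by simp [hy])))

lemma dropWhile_all_append (k : String) (ps zs : List String)
    (h : ∀ y ∈ ps, snKey y = k) :
    (ps ++ zs).dropWhile (fun y => snKey y == k) = zs.dropWhile (fun y => snKey y == k) := by
  induction ps with
  | nil => rfl
  | cons q qs ih =>
    have hq : snKey q = k := h q (by simp)
    simp only [List.cons_append, List.dropWhile_cons, hq, beq_self_eq_true]
    exact ih (fun y hy => h y (by simp [hy]))

-- one run of gssnRuns, when preceded by pending elements that all share its head's key
lemma gssnRuns_pending (pending : List String) (sn : String) (rest : List String)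
    (hp : ∀ y ∈ pending, snKey y = snKey sn) :
    gssnRuns (pending ++ sn :: rest) =
      (snKey sn, pending ++ sn :: rest.takeWhile (fun y => snKey y == snKey sn)) ::
        gssnRuns (rest.dropWhile (fun y => snKey y == snKey sn)) := by
  induction pending with
  | nil => simp [gssnRuns]
  | cons p ps ih =>
    have hpk : snKey p = snKey sn := hp p (by simp)
    have hps : ∀ y ∈ ps, snKey y = snKey sn := fun y hy => hp y (by simp [hy])
    rw [List.cons_append, gssnRuns]
    have htw := takeWhile_all_append (snKey sn) ps (sn :: rest) hps
    have hdw := dropWhile_all_append (snKey sn) ps (sn :: rest) hps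
    simp only [List.takeWhile_cons, beq_self_eq_true] at htw
    simp only [List.dropWhile_cons, beq_self_eq_true] at hdw
    simp [hpk, htw, hdw]

-- the pending slice grows by the current element
lemma take_drop_snoc (orig : List String) (start idx : Nat) (sn : String)
    (rest' : List String) (hsi : start ≤ idx) (hdrop : orig.drop idx = sn :: rest') :
    (orig.drop start).take (idx + 1 - start) = (orig.drop start).take (idx - start) ++ [sn] := by
  have h1 : (orig.drop start).drop (idx - start) = sn :: rest' := by
    rw [List.drop_drop]
    have h0 : start + (idx - start) = idx := by omega
    rw [h0]; exact hdrop
  have h2 : (orig.drop start)[idx - start]? = some sn := by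
    rw [← List.head?_drop, h1]; rfl
  have h3 : idx + 1 - start = (idx - start) + 1 := by omega
  rw [h3, List.take_add_one, h2]
  rfl

-- main loop invariant: pending = orig[start:idx], rest = orig[idx:]
lemma gssnLoopA_eq (orig : List String) :
    ∀ (rest : List String) (d : PySem.Dict String (List String)) (start idx : Nat),
    start ≤ idx →
    orig.drop idx = rest →
    ((orig.drop start).take (idx - start) = [] ∨ rest ≠ []) →
    (∀ sn rest', rest = sn :: rest' →
       ∀ y ∈ (orig.drop start).take (idx - start), snKey y = snKey sn) →
    gssnLoopA orig d start idx rest =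
      (gssnRuns ((orig.drop start).take (idx - start) ++ rest)).foldl
        (fun d kg => d.insert kg.1 kg.2) d := by
  intro rest
  induction rest with
  | nil =>
    intro d start idx _ _ hpe _
    have hp : (orig.drop start).take (idx - start) = [] := by
      rcases hpe with h | h
      · exact h
      · exact absurd rfl h
    rw [hp]
    simp [gssnLoopA, gssnRuns]
  | cons sn rest' ih =>
    intro d start idx hsi hdrop _ hkeys
    have hk : ∀ y ∈ (orig.drop start).take (idx - start), snKey y = snKey sn :=
      hkeys sn rest' rfl
    have hslice : PySem.List.slice orig (some (start : Int)) (some ((idx : Int) + 1))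
        = (orig.drop start).take (idx - start) ++ [sn] := by
      have hcast : ((idx : Int) + 1) = ((idx + 1 : Nat) : Int) := by push_cast; ring
      rw [hcast, PySem.List.slice_natCast, take_drop_snoc orig start idx sn rest' hsi hdrop]
    have hdrop' : orig.drop (idx + 1) = rest' := by
      rw [← List.drop_drop, hdrop]; rfl
    match rest' with
    | [] =>
      rw [gssnLoopA]
      simp only [snKey_def, hslice]
      rw [gssnRuns_pending _ sn [] hk]
      simp [gssnRuns]
    | sn2 :: rs =>
      rw [gssnLoopA]
      simp only [snKey_def, hslice]
      by_cases hc : snKey sn = snKey sn2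
      · rw [if_pos hc]
        have hpend' : (orig.drop start).take (idx + 1 - start)
            = (orig.drop start).take (idx - start) ++ [sn] :=
          take_drop_snoc orig start idx sn (sn2 :: rs) hsi hdrop
        have hrec := ih d start (idx + 1) (by omega) hdrop' (Or.inr (by simp)) ?_
        · rw [hrec, hpend']
          simp
        · intro sn' rest'' heq y hy
          cases heq
          rw [hpend'] at hy
          rcases List.mem_append.mp hy with h | h
          · rw [hk y h, hc]
          · simp at h; rw [h, hc]
      · rw [if_neg hc]
        have hrec := ih (d.insert (snKey sn) ((orig.drop start).take (idx - start) ++ [sn]))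
          (idx + 1) (idx + 1) le_rfl hdrop' (Or.inr (by simp)) ?_
        · rw [hrec]
          simp only [Nat.sub_self, List.take_zero, List.nil_append]
          rw [gssnRuns_pending _ sn (sn2 :: rs) hk]
          have hne : (snKey sn2 == snKey sn) = false :=
            beq_eq_false_iff_ne.mpr (Ne.symm hc)
          have htw : (sn2 :: rs).takeWhile (fun y => snKey y == snKey sn) = [] := by
            simp [hne]
          have hdw : (sn2 :: rs).dropWhile (fun y => snKey y == snKey sn) = sn2 :: rs := by
            simp [hne]
          rw [htw, hdw]
          simp
        · intro sn' rest'' heq y hy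
          simp at hy

-- ===== VERDICT (by name: the statement is the Claim_ definition above) =====
theorem get_stacks_serial_numb_spec : Claim_equal_get_stacks_serial_numb := by
  intro sns _
  unfold Spec_get_stacks_serial_numb get_stacks_serial_numb get_stacks_serial_numb_alt
  rw [gssnLoopA_eq sns sns PySem.Dict.empty 0 0 le_rfl (by simp)
    (by cases sns <;> simp) (by intro _ _ _ y hy; simp at hy)]
  simp
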